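-- pv_equiv track=rewrite | github.com/masymars/turingM | turing.py | putit
-- ===== SOURCE A (Python) =====
-- def putit(sp,pos,p):
--    spt = ""
--    i=0
--    for i in range(len(sp)):
--        if i == pos :
--            spt = spt + "(" + p +")"
--        spt = spt+sp[i]
--        i=i+1
--    return spt
-- ===== SOURCE B (Python) =====
-- def putit(sp, pos, p):
--     if 0 <= pos < len(sp):
--         return sp[:pos] + "(" + p + ")" + sp[pos:]
--     return sp
-- ===== Notes on version B (the rewrite author's own statement) =====
-- stated objective: faster
-- what changed: Replaced the per-index loop with repeated string concatenation and an equality test at every index by a single bounds check and one slice concatenation sp[:pos] + '(' + p + ')' + sp[pos:].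
import Mathlib
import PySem

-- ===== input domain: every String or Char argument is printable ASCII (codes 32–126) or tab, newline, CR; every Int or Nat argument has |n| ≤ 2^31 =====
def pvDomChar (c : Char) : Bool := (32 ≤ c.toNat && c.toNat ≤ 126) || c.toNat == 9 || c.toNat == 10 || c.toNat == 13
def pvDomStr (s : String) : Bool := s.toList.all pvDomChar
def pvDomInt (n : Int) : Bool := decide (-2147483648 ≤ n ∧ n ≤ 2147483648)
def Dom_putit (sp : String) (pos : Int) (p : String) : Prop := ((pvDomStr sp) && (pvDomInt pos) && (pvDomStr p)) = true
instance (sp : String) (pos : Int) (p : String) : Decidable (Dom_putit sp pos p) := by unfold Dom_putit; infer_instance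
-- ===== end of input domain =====

-- B replaces A's quadratic index-by-index rebuild with one bounds check and a single slice concatenation.

-- ===== PORT A =====
-- for i in range(len(sp)): if i == pos: spt += "(" + p + ")"; spt += sp[i]
-- sp[i]: i is always in 0..len(sp)-1 here, so pyGetD's default is never reached.
def putit (sp : String) (pos : Int) (p : String) : String :=
  String.ofList <|
    (PySem.List.pyRange 0 (PySem.Str.len sp) 1).foldl
      (fun spt i =>
        (if i = pos then spt ++ ('(' :: p.toList ++ [')']) else spt)
          ++ [PySem.List.pyGetD sp.toList i ' '])
      []

-- ===== PORT B =====
def putit_alt (sp : String) (pos : Int) (p : String) : String :=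
  if 0 ≤ pos ∧ pos < PySem.Str.len sp then
    String.ofList
      (PySem.List.slice sp.toList none (some pos)
        ++ ('(' :: p.toList ++ [')'])
        ++ PySem.List.slice sp.toList (some pos) none)
  else sp

-- ===== PRECONDITION & SPEC =====
def Spec_putit (sp : String) (pos : Int) (p : String) (out : String) : Prop := out = putit_alt sp pos p
instance (sp : String) (pos : Int) (p : String) (out : String) : Decidable (Spec_putit sp pos p out) := by unfold Spec_putit; infer_instance

-- ===== CLAIM (what is proved, stated in full; the proofs are below) =====
def Claim_equal_putit : Prop := ∀ (sp : String) (pos : Int) (p : String), Dom_putit sp pos p → Spec_putit sp pos p (putit sp pos p)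

-- ===== LEMMAS AND PROOFS =====

-- Over a stretch of indices never equal to pos, A's loop body just appends the characters.
lemma putit_fold_nohit (cs : List Char) (pos : Int) (par : List Char) (a b : Int)
    (h : ∀ i ∈ PySem.List.pyRange a b 1, i ≠ pos) (acc : List Char) :
    (PySem.List.pyRange a b 1).foldl
      (fun spt i => (if i = pos then spt ++ par else spt) ++ [PySem.List.pyGetD cs i ' ']) acc
    = acc ++ (PySem.List.pyRange a b 1).map (fun i => PySem.List.pyGetD cs i ' ') := by
  rw [PySem.List.foldl_congr_mem _ _ (fun spt i => spt ++ [PySem.List.pyGetD cs i ' ']) _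
        (by intro acc' x hx; rw [if_neg (h x hx)]),
      PySem.List.foldl_append_singleton_eq_map]

-- ===== VERDICT (by name: the statement is the Claim_ definition above) =====
theorem putit_spec : Claim_equal_putit := by
  intro sp pos p _
  unfold Spec_putit putit putit_alt
  set cs := sp.toList with hcs
  have hlen : PySem.Str.len sp = PySem.List.len cs := by
    simp [PySem.Str.len, PySem.List.len, hcs]
  by_cases hrng : 0 ≤ pos ∧ pos < PySem.Str.len sp
  · obtain ⟨h0, hlt⟩ := hrng
    rw [if_pos ⟨h0, hlt⟩, hlen] at *
    have hsplit := PySem.List.pyRange_one_append 0 pos (PySem.List.len cs) h0 (le_of_lt hlt)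
    have hcons := PySem.List.pyRange_one_cons hlt
    -- left part: no hit
    have hleft := putit_fold_nohit cs pos ('(' :: p.toList ++ [')']) 0 pos
      (by intro i hi; have := (PySem.List.mem_pyRange_one).1 hi; omega) []
    -- right tail: no hit
    have hright := putit_fold_nohit cs pos ('(' :: p.toList ++ [')']) (pos + 1) (PySem.List.len cs)
      (by intro i hi; have := (PySem.List.mem_pyRange_one).1 hi; omega)
    -- prefix of cs
    have hmapfull := PySem.List.map_pyGetD_pyRange_zero cs ' '
    have hmapdrop := PySem.List.map_pyGetD_pyRange cs ' ' h0
    have hmapsplit : (PySem.List.pyRange 0 (PySem.List.len cs) 1).map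
        (fun i => PySem.List.pyGetD cs i ' ')
        = (PySem.List.pyRange 0 pos 1).map (fun i => PySem.List.pyGetD cs i ' ')
          ++ (PySem.List.pyRange pos (PySem.List.len cs) 1).map (fun i => PySem.List.pyGetD cs i ' ') := by
      rw [hsplit, List.map_append]
    have htake : (PySem.List.pyRange 0 pos 1).map (fun i => PySem.List.pyGetD cs i ' ')
        = cs.take pos.toNat := by
      have : (PySem.List.pyRange 0 pos 1).map (fun i => PySem.List.pyGetD cs i ' ')
          ++ cs.drop pos.toNat = cs.take pos.toNat ++ cs.drop pos.toNat := by
        rw [List.take_append_drop, ← hmapdrop, ← hmapsplit, hmapfull]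
      exact List.append_cancel_right this
    have hdroptail : [PySem.List.pyGetD cs pos ' ']
        ++ (PySem.List.pyRange (pos + 1) (PySem.List.len cs) 1).map (fun i => PySem.List.pyGetD cs i ' ')
        = cs.drop pos.toNat := by
      rw [← hmapdrop, hcons, List.map_cons]; rfl
    rw [hsplit, List.foldl_append, hleft, hcons, List.foldl_cons]
    rw [hright]
    rw [PySem.List.slice_to _ h0, PySem.List.slice_from _ h0]
    rw [htake]
    congr 1
    simp only [List.append_assoc, List.nil_append]
    rw [← hdroptail]
    simp [List.append_assoc]
  · rw [if_neg hrng, hlen]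
    have hnohit : ∀ i ∈ PySem.List.pyRange 0 (PySem.List.len cs) 1, i ≠ pos := by
      intro i hi
      have := (PySem.List.mem_pyRange_one).1 hi
      rw [hlen] at hrng
      omega
    rw [putit_fold_nohit cs pos ('(' :: p.toList ++ [')']) 0 (PySem.List.len cs) hnohit []]
    rw [List.nil_append, PySem.List.map_pyGetD_pyRange_zero, hcs, String.ofList_toList]
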